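-- pv_equiv track=rewrite | github.com/MichalxPZ/PUT-HackerRank-Python | PastTests/Sorting the matrix.py | matsort
-- ===== SOURCE A (Python) =====
-- def matsort(mat, m):
--     mat = sorted(mat)
--     retmat = [[0 for col in range(m)] for row in range(len(mat)//m)]
--     for i in range(m):
--         for j in range(len(mat)//m):
--             retmat[j][i] = mat[0]
--             for k in range(len(mat)-1):
--                 mat[k] = mat[k+1]
--     ret = ''
--     for i in retmat:
--         list_to_string = ''
--         for j in i:
--             list_to_string += str(j) + " "
--         ret += list_to_string
--         ret += "\n"
--
--     return ret
-- ===== SOURCE B (Python) =====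
-- def matsort(mat, m):
--     rows = len(mat) // m
--     s = sorted(mat)
--     return ''.join(
--         ''.join(str(s[i * rows + j]) + ' ' for i in range(m)) + '\n'
--         for j in range(rows)
--     )
-- ===== Notes on version B (the rewrite author's own statement) =====
-- stated objective: faster
-- what changed: B replaces A's zero-matrix construction plus per-element full-list left-shift (each of the n writes shifts the whole n-element list) with direct stride indexing into the sorted list, building the output string in one pass of joins.
import Mathlib
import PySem

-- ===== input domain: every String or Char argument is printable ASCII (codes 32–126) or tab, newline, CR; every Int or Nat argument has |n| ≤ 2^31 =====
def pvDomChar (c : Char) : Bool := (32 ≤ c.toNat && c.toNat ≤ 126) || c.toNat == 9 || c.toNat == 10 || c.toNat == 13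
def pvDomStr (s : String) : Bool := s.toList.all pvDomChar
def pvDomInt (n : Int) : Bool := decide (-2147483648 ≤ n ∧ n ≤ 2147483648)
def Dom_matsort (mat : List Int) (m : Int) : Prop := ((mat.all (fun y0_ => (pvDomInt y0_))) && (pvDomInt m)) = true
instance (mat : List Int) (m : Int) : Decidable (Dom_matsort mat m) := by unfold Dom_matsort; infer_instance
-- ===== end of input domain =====

-- B replaces A's zero-matrix construction plus per-element full-list left-shift with direct
-- stride indexing into the sorted list, joining the pieces in one pass (objective: faster; A shifts the whole list once per written element).


-- ===== PORT A =====
-- 'for k in range(len(mat)-1): mat[k] = mat[k+1]'  (one full left-shift pass over mat)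
def pyShift (l : List Int) : List Int :=
  (PySem.List.pyRange 0 ((l.length : Int) - 1) 1).foldl
    (fun acc k => PySem.List.pySetD acc k (PySem.List.pyGetD acc (k + 1) 0)) l

def matsort (mat : List Int) (m : Int) : String :=
  let s := PySem.List.sorted mat (fun x => x) false
  let rows := PySem.Int.floordiv (s.length : Int) m
  let retmat0 : List (List Int) :=
    (PySem.List.pyRange 0 rows 1).map (fun _ => (PySem.List.pyRange 0 m 1).map (fun _ => (0 : Int)))
  let st :=
    (PySem.List.pyRange 0 m 1).foldl (fun st i =>
      (PySem.List.pyRange 0 rows 1).foldl (fun st j =>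
        (PySem.List.pySetD st.1 j
          (PySem.List.pySetD (PySem.List.pyGetD st.1 j []) i (PySem.List.pyGetD st.2 0 0)),
         pyShift st.2)) st) (retmat0, s)
  st.1.foldl (fun ret row =>
    ret ++ row.foldl (fun acc j => acc ++ PySem.Int.toStr j ++ " ") "" ++ "\n") ""

-- ===== PORT B =====
def matsort_alt (mat : List Int) (m : Int) : String :=
  let rows := PySem.Int.floordiv ((mat.length : Int)) m
  let s := PySem.List.sorted mat (fun x => x) false
  String.join ((PySem.List.pyRange 0 rows 1).map (fun j =>
    String.join ((PySem.List.pyRange 0 m 1).map (fun i =>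
      PySem.Int.toStr (PySem.List.pyGetD s (i * rows + j) 0) ++ " ")) ++ "\n"))

-- ===== PRECONDITION & SPEC =====
-- Pre_ excludes exactly m = 0, on which Python A raises ZeroDivisionError at len(mat)//m
-- (B's division raises there too).
def Pre_matsort (mat : List Int) (m : Int) : Prop := m ≠ 0
instance (mat : List Int) (m : Int) : Decidable (Pre_matsort mat m) := by unfold Pre_matsort; infer_instance
def pvWitness_matsort : List Int × Int := ([3, 1, 2, 5, 4, 6], 2)

def Spec_matsort (mat : List Int) (m : Int) (out : String) : Prop := out = matsort_alt mat m
instance (mat : List Int) (m : Int) (out : String) : Decidable (Spec_matsort mat m out) := by unfold Spec_matsort; infer_instance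

-- ===== CLAIM (what is proved, stated in full; the proofs are below) =====
def Claim_equal_matsort : Prop := ∀ (mat : List Int) (m : Int), Dom_matsort mat m → Pre_matsort mat m → Spec_matsort mat m (matsort mat m)

-- ===== LEMMAS AND PROOFS =====

-- the column written so far after t writes, as a function of the step counter t
def colF (s : List Int) (M R t j : Nat) : List Int :=
  (List.range M).map (fun i => if i * R + j < t then s.getD (i * R + j) 0 else 0)

theorem pyShift_aux (l : List Int) (t : Nat) (ht : t ≤ l.length - 1) (hl : 1 ≤ l.length) :
    (List.map (fun k : Nat => (k : Int)) (List.range t)).foldl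
      (fun acc k => PySem.List.pySetD acc k (PySem.List.pyGetD acc (k + 1) 0)) l
    = (l.drop 1).take t ++ l.drop t := by
  induction t with
  | zero => simp
  | succ t ih =>
    have ht' : t ≤ l.length - 1 := by omega
    have htn : t + 1 < l.length := by omega
    rw [List.range_succ, List.map_append, List.foldl_append, ih ht']
    simp only [List.map_cons, List.map_nil, List.foldl_cons, List.foldl_nil]
    have hT : ((l.drop 1).take t).length = t := by
      simp [List.length_take]; omega
    have hget : PySem.List.pyGetD ((l.drop 1).take t ++ l.drop t) ((t : Int) + 1) 0 = l[t+1] := by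
      have : ((t : Int) + 1) = ((t + 1 : Nat) : Int) := by push_cast; ring
      rw [this, PySem.List.pyGetD_natCast]
      rw [List.getD_eq_getElem _ _ (by simp; omega)]
      rw [List.getElem_append_right (by omega)]
      rw [List.getElem_drop]
      congr 1
      omega
    rw [hget]
    have hset : PySem.List.pySetD ((l.drop 1).take t ++ l.drop t) (t : Int) l[t+1]
        = (l.drop 1).take (t+1) ++ l.drop (t+1) := by
      rw [PySem.List.pySetD_natCast]
      rw [List.set_append]
      simp only [hT, lt_irrefl, Nat.sub_self]
      have hdt : l.drop t = l[t] :: l.drop (t+1) := List.drop_eq_getElem_cons (by omega)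
      rw [hdt]
      simp only [List.set_cons_zero]
      have : (l.drop 1).take (t + 1) = (l.drop 1).take t ++ [l[t+1]] := by
        rw [List.take_add_one]
        congr 1
        rw [List.getElem?_drop]
        rw [List.getElem?_eq_getElem (by omega)]
        simp; congr 1; omega
      rw [this, List.append_assoc]
      simp
    rw [hset]

theorem pyShift_eq (l : List Int) :
    pyShift l = l.drop 1 ++ l.drop (l.length - 1) := by
  unfold pyShift
  rcases Nat.eq_zero_or_pos l.length with h0 | hpos
  · rw [PySem.List.pyRange_one_eq_nil (by omega)]
    simp [List.eq_nil_of_length_eq_zero h0]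
  · have : ((l.length : Int) - 1) = ((l.length - 1 : Nat) : Int) := by omega
    rw [this, PySem.List.pyRange_zero_natCast]
    rw [pyShift_aux l (l.length - 1) (le_refl _) hpos]
    rw [List.take_of_length_le (by simp)]

theorem pyShift_drop (s junk : List Int) (t : Nat) (ht : t < s.length)
    (hlen : (s.drop t ++ junk).length = s.length) :
    ∃ junk', pyShift (s.drop t ++ junk) = s.drop (t + 1) ++ junk' ∧
      (s.drop (t + 1) ++ junk').length = s.length := by
  refine ⟨junk ++ (s.drop t ++ junk).drop ((s.drop t ++ junk).length - 1), ?_, ?_⟩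
  · rw [pyShift_eq]
    have hdt : s.drop t = s[t] :: s.drop (t + 1) := List.drop_eq_getElem_cons ht
    simp only [hdt, List.cons_append, List.tail_cons, List.drop_one,
      List.append_assoc]
  · simp only [List.length_append, List.length_drop] at *
    omega

theorem pair_unique {i i' j j' R : Nat} (hR : 0 < R) (hj : j < R) (hj' : j' < R)
    (h : i' * R + j' = i * R + j) : i' = i ∧ j' = j := by
  have h1 : j' = (j' + i' * R) % R := by
    rw [Nat.add_mul_mod_self_right, Nat.mod_eq_of_lt hj']
  have h2 : j = (j + i * R) % R := by
    rw [Nat.add_mul_mod_self_right, Nat.mod_eq_of_lt hj]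
  have hjj : j' = j := by rw [h1, h2]; congr 1; omega
  subst hjj
  have : i' * R = i * R := by omega
  exact ⟨Nat.eq_of_mul_eq_mul_right hR this, rfl⟩

theorem innerLem (s : List Int) (M R : Nat) (hR : 0 < R) (hMR : M * R ≤ s.length)
    (i : Nat) (hi : i < M) (jl : Nat) (hjl : jl ≤ R) (junk : List Int)
    (hlen : (s.drop (i * R + (R - jl)) ++ junk).length = s.length) :
    ∃ junk',
      (PySem.List.pyRange ((R - jl : Nat) : Int) (R : Int) 1).foldl
        (fun st j =>
          (PySem.List.pySetD st.1 j
            (PySem.List.pySetD (PySem.List.pyGetD st.1 j []) (i : Int)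
              (PySem.List.pyGetD st.2 0 0)), pyShift st.2))
        ((List.range R).map (colF s M R (i * R + (R - jl))), s.drop (i * R + (R - jl)) ++ junk)
      = ((List.range R).map (colF s M R ((i + 1) * R)), s.drop ((i + 1) * R) ++ junk')
      ∧ (s.drop ((i + 1) * R) ++ junk').length = s.length := by
  induction jl generalizing junk with
  | zero =>
    have h1 : (i + 1) * R = i * R + (R - 0) := by rw [Nat.succ_mul]; omega
    refine ⟨junk, ?_, ?_⟩
    · rw [PySem.List.pyRange_one_eq_nil (by omega), List.foldl_nil, h1]
    · rw [h1]; exact hlen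
  | succ jl ih =>
    have hj0 : R - (jl + 1) < R := by omega
    set j0 := R - (jl + 1) with hj0def
    have ht0 : i * R + j0 < s.length := by
      have h1 : i * R + R ≤ M * R := by
        calc i * R + R = (i + 1) * R := (Nat.succ_mul i R).symm
        _ ≤ M * R := Nat.mul_le_mul_right R (by omega)
      omega
    set t0 := i * R + j0 with ht0def
    rw [PySem.List.pyRange_one_cons (by exact_mod_cast hj0), List.foldl_cons]
    have hdt : s.drop t0 = s[t0] :: s.drop (t0 + 1) := List.drop_eq_getElem_cons ht0
    have hget0 : PySem.List.pyGetD (s.drop t0 ++ junk) 0 0 = s[t0] := by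
      rw [hdt, List.cons_append, PySem.List.pyGetD_zero_cons]
    have hrow : PySem.List.pyGetD ((List.range R).map (colF s M R t0)) ((j0 : Nat) : Int) []
        = colF s M R t0 j0 := by
      rw [PySem.List.pyGetD_natCast, PySem.List.getD_map_range _ _ _ _ hj0]
    have hsetrow : PySem.List.pySetD (colF s M R t0 j0) ((i : Nat) : Int) s[t0]
        = colF s M R (t0 + 1) j0 := by
      rw [PySem.List.pySetD_natCast]
      apply List.ext_getElem
      · simp [colF]
      · intro i' h1 h2
        simp only [colF, List.length_set, List.length_map, List.length_range] at h1 h2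
        simp only [colF, List.getElem_set, List.getElem_map, List.getElem_range]
        by_cases hii : i = i'
        · subst hii
          rw [if_pos rfl, if_pos (by omega), List.getD_eq_getElem _ _ (by omega)]
        · rw [if_neg hii]
          have hne : i' * R + j0 ≠ t0 := fun hc => hii (pair_unique hR hj0 hj0 hc).1.symm
          by_cases hlt : i' * R + j0 < t0
          · rw [if_pos hlt, if_pos (by omega)]
          · rw [if_neg hlt, if_neg (by omega)]
    have hsetmat : PySem.List.pySetD ((List.range R).map (colF s M R t0)) ((j0 : Nat) : Int)
          (colF s M R (t0 + 1) j0)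
        = (List.range R).map (colF s M R (t0 + 1)) := by
      rw [PySem.List.pySetD_natCast]
      apply List.ext_getElem
      · simp
      · intro j' h1 h2
        simp only [List.length_set, List.length_map, List.length_range] at h1 h2
        simp only [List.getElem_set, List.getElem_map, List.getElem_range]
        by_cases hjj : j0 = j'
        · subst hjj; rw [if_pos rfl]
        · rw [if_neg hjj]
          unfold colF
          apply List.map_congr_left
          intro i' hi'
          simp only [List.mem_range] at hi'
          have hne : i' * R + j' ≠ t0 := fun hc => hjj (pair_unique hR hj0 h2 hc).2.symm
          by_cases hlt : i' * R + j' < t0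
          · rw [if_pos hlt, if_pos (by omega)]
          · rw [if_neg hlt, if_neg (by omega)]
    obtain ⟨junk2, hshift, hlen2⟩ := pyShift_drop s junk t0 ht0 hlen
    have hstep : i * R + (R - jl) = t0 + 1 := by omega
    have hcast : ((R - (jl + 1) : Nat) : Int) + 1 = ((R - jl : Nat) : Int) := by omega
    rw [hcast]
    simp only [hget0, hrow, hsetrow, hsetmat, hshift]
    rw [← hstep]
    exact ih (by omega) junk2 (by rw [hstep]; exact hlen2)

theorem outerLem (s : List Int) (M R : Nat) (hR : 0 < R) (hMR : M * R ≤ s.length)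
    (il : Nat) (hil : il ≤ M) (junk : List Int)
    (hlen : (s.drop ((M - il) * R) ++ junk).length = s.length) :
    ∃ junk',
      (PySem.List.pyRange ((M - il : Nat) : Int) (M : Int) 1).foldl
        (fun st i =>
          (PySem.List.pyRange 0 (R : Int) 1).foldl
            (fun st j =>
              (PySem.List.pySetD st.1 j
                (PySem.List.pySetD (PySem.List.pyGetD st.1 j []) i
                  (PySem.List.pyGetD st.2 0 0)), pyShift st.2)) st)
        ((List.range R).map (colF s M R ((M - il) * R)), s.drop ((M - il) * R) ++ junk)
      = ((List.range R).map (colF s M R (M * R)), s.drop (M * R) ++ junk') := by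
  induction il generalizing junk with
  | zero =>
    refine ⟨junk, ?_⟩
    rw [PySem.List.pyRange_one_eq_nil (a := ((M - 0 : Nat) : Int)) (b := (M : Int)) (by omega),
      List.foldl_nil]
    simp
  | succ il ih =>
    have hi : M - (il + 1) < M := by omega
    set i := M - (il + 1) with hidef
    rw [PySem.List.pyRange_one_cons (a := ((M - (il + 1) : Nat) : Int)) (b := (M : Int))
      (by exact_mod_cast hi), List.foldl_cons]
    obtain ⟨junk2, hin, hlen2⟩ :=
      innerLem s M R hR hMR i hi R (le_refl R) junk
        (by simp only [Nat.sub_self, Nat.add_zero]; exact hlen)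
    have e : ((R - R : Nat) : Int) = 0 := by simp
    rw [e] at hin
    simp only [Nat.sub_self, Nat.add_zero] at hin
    have hsucc : i + 1 = M - il := by omega
    rw [hsucc] at hin
    have hcast : ((M - (il + 1) : Nat) : Int) + 1 = ((M - il : Nat) : Int) := by omega
    rw [hcast]

    rw [hin]
    exact ih (by omega) junk2 (by rw [← hsucc]; exact hlen2)

theorem str_foldl_shift2 (L : List String) (a : String) :
    L.foldl (· ++ ·) a = a ++ L.foldl (· ++ ·) "" := by
  induction L generalizing a with
  | nil => simp
  | cons x t ih => rw [List.foldl_cons, List.foldl_cons, ih (a ++ x), ih (("" : String) ++ x)]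
                   simp [String.append_assoc]

theorem str_join_cons2 (x : String) (L : List String) :
    String.join (x :: L) = x ++ String.join L := by
  simp only [String.join, List.foldl_cons]
  rw [str_foldl_shift2]
  simp

theorem foldl_append_str {α : Type} (l : List α) (f : α → String) (a : String) :
    l.foldl (fun acc x => acc ++ f x) a = a ++ String.join (l.map f) := by
  induction l generalizing a with
  | nil => simp [String.join]
  | cons x t ih =>
      rw [List.foldl_cons, ih, List.map_cons, str_join_cons2]
      simp [String.append_assoc]

theorem matsort_eq_alt (mat : List Int) (m : Int) (hm : m ≠ 0) :
    matsort mat m = matsort_alt mat m := by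
  unfold matsort matsort_alt
  simp only []
  have hslen : (PySem.List.sorted mat (fun x => x) false).length = mat.length :=
    (PySem.List.sorted_perm mat _ false).length_eq
  rw [hslen]
  set s := PySem.List.sorted mat (fun x => x) false with hs
  set rows := PySem.Int.floordiv ((mat.length : Int)) m with hrows
  by_cases hpos : 0 < rows
  case neg =>
    have hneg : rows ≤ 0 := by omega
    rw [PySem.List.pyRange_one_eq_nil hneg]
    simp [String.join]
  case pos =>
    -- main case
    have hmpos : 0 < m := by
      rcases lt_trichotomy m 0 with hmlt | h0 | h
      case inr.inl => exact absurd h0 hm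
      case inr.inr => exact h
      exfalso
      have h1 := PySem.Int.floordiv_mul_add_mod ((mat.length : Int)) m
      rw [← hrows] at h1
      have h2 := PySem.Int.mod_neg_bounds ((mat.length : Int)) hmlt
      nlinarith [Int.natCast_nonneg mat.length]
    set M := m.toNat with hM
    set R := rows.toNat with hR
    have hMc : (M : Int) = m := Int.toNat_of_nonneg (by omega)
    have hRc : (R : Int) = rows := Int.toNat_of_nonneg (by omega)
    have hRpos : 0 < R := by omega
    have hMR : M * R ≤ s.length := by
      have h1 := PySem.Int.floordiv_mul_add_mod ((mat.length : Int)) m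
      rw [← hrows] at h1
      have h2 := PySem.Int.mod_nonneg ((mat.length : Int)) hmpos
      have h3 : rows * m ≤ (mat.length : Int) := by omega
      have h4 : ((M * R : Nat) : Int) ≤ (mat.length : Int) := by
        push_cast
        rw [hMc, hRc]
        nlinarith
      have := (PySem.List.sorted_perm mat (fun x => x) false).length_eq
      omega
    obtain ⟨junk', hout⟩ := outerLem s M R hRpos hMR M (le_refl M) []
      (by simp)
    simp only [Nat.sub_self, Nat.cast_zero, Nat.zero_mul, List.drop_zero, List.append_nil] at hout
    rw [← hMc, ← hRc]
    rw [PySem.List.pyRange_zero_natCast R, PySem.List.pyRange_zero_natCast M]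
    rw [PySem.List.pyRange_zero_natCast R, PySem.List.pyRange_zero_natCast M] at hout
    have hret0 : ((List.range R).map (fun k : Nat => (k : Int))).map
          (fun _ => ((List.range M).map (fun k : Nat => (k : Int))).map (fun _ => (0 : Int)))
        = (List.range R).map (colF s M R 0) := by
      simp only [List.map_map]
      apply List.map_congr_left
      intro a _
      simp [colF, Function.comp_def]
    rw [hret0, hout]
    -- string building
    simp only [String.append_assoc]
    rw [foldl_append_str ((List.range R).map (colF s M R (M * R)))
      (fun row => row.foldl (fun acc j => acc ++ (PySem.Int.toStr j ++ " ")) "" ++ "\n") ""]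
    simp only [List.map_map]
    have hjoin : ∀ L : List String, "" ++ String.join L = String.join L := by
      intro L; simp
    rw [hjoin]
    congr 1
    apply List.map_congr_left
    intro j hj
    simp only [List.mem_range] at hj
    simp only [Function.comp]
    rw [foldl_append_str (colF s M R (M * R) j)
      (fun v => PySem.Int.toStr v ++ " ") ""]
    rw [hjoin]
    congr 1
    unfold colF
    simp only [List.map_map]
    apply congrArg String.join
    apply List.map_congr_left
    intro i hi
    simp only [List.mem_range] at hi
    simp only [Function.comp]
    have hcond : i * R + j < M * R := by
      have h1 : (i + 1) * R ≤ M * R := Nat.mul_le_mul_right R (by omega)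
      have h2 : i * R + j < (i + 1) * R := by rw [Nat.succ_mul]; omega
      omega
    rw [if_pos hcond]
    have hcast2 : ((i : Int) * (R : Int) + (j : Int)) = ((i * R + j : Nat) : Int) := by
      push_cast; ring
    rw [hcast2, PySem.List.pyGetD_natCast]

-- ===== VERDICT (by name: the statement is the Claim_ definition above) =====
theorem matsort_spec : Claim_equal_matsort := by
  intro mat m _ hpre
  unfold Spec_matsort
  exact matsort_eq_alt mat m hpre
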